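-- pv_equiv track=rewrite | github.com/the-pinbo/ROBDD | urp.py | _most_binate
-- ===== SOURCE A (Python) =====
-- import operator
-- from collections import defaultdict
--
-- def _all_max(values, key=None):
--     maxTotal = max(values, key=key)
--     return (v for v in values if key(v) == key(maxTotal))
--
-- def _all_min(values, key=None):
--     minTotal = min(values, key=key)
--     return (v for v in values if key(v) == key(minTotal))
--
-- def _most_binate(cubes):
--     """Returns the variable that appears in the most cubes
--     """
--     # Find the variable that occurs in the most cubes
--     counts = defaultdict(lambda: [0, 0, 0])
--     # counts = {var: [positive, negative, total]}
--     for cube in cubes: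
--         for v in cube:
--             counts[abs(v)][v > 0] += 1
--             counts[abs(v)][2] += 1
--     # Find the variable that occurs in the most cubes
--     binate = tuple((v, c) for v, c in counts.items() if c[0] > 0 and c[1] > 0)
--     if len(binate) > 0:
--         # Pick smallest index if there is a tie
--         mostBinate = tuple(_all_max(binate, key=lambda arg: arg[1][2]))
--         # Pick smallest index if there is a tie
--         ties = _all_min(mostBinate, key=lambda arg: abs(arg[1][1] - arg[1][0]))
--     else:
--         # Again, pick smallest index if there is a tie
--         ties = _all_max(counts.items(), key=lambda arg: arg[1][2])
--     # Return the variable with the smallest index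
--     choice = min(map(operator.itemgetter(0), ties))
--     return choice
-- ===== SOURCE B (Python) =====
-- def _most_binate(cubes):
--     """Returns the variable that appears in the most cubes"""
--     counts = {}
--     for cube in cubes:
--         for v in cube:
--             a = abs(v)
--             n, p, t = counts.get(a, (0, 0, 0))
--             counts[a] = (n, p + 1, t + 1) if v > 0 else (n + 1, p, t + 1)
--     items = list(counts.items())
--     binate = [(var, c) for var, c in items if c[0] > 0 and c[1] > 0]
--     if binate:
--         return min(binate, key=lambda it: (-it[1][2], abs(it[1][1] - it[1][0]), it[0]))[0]
--     return min(items, key=lambda it: (-it[1][2], it[0]))[0]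
-- ===== Notes on version B (the rewrite author's own statement) =====
-- stated objective: simpler
-- what changed: Replaces A's _all_max/_all_min generator cascade (max pass + filter, min pass + filter, then min over indices) by a single first-minimum scan per branch using one lexicographic key (-total, |pos-neg|, var) for binate variables, or (-total, var) in the fallback; the helper generators disappear.
import Mathlib
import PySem

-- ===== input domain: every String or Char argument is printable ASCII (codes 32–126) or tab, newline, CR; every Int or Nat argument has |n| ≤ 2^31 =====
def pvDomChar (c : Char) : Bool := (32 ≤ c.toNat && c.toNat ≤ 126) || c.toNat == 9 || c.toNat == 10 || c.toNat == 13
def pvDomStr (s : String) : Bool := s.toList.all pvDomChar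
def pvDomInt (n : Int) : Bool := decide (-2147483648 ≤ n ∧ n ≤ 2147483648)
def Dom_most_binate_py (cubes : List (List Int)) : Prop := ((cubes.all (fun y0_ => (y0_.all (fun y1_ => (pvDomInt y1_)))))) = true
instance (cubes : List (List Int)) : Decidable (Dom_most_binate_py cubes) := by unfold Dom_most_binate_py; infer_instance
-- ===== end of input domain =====

-- B replaces A's _all_max/_all_min filter cascade by a single first-minimum scan with a
-- lexicographic key (simpler selection; same counting idea). Equivalence of return values.

-- ===== PORT A =====
-- Python max(values, key)/min(values, key) return the FIRST extremal element; on [] they raise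
-- ValueError (unreachable under Pre_, ported as the empty filter below / the .getD 0 default).
def pvAllMax (values : List (Int × (Int × Int × Int))) (key : (Int × (Int × Int × Int)) → Int) :
    List (Int × (Int × Int × Int)) :=
  match PySem.List.max? values key with
  | none => []
  | some m => values.filter (fun v => key v == key m)

def pvAllMin (values : List (Int × (Int × Int × Int))) (key : (Int × (Int × Int × Int)) → Int) :
    List (Int × (Int × Int × Int)) :=
  match PySem.List.min? values key with
  | none => []
  | some m => values.filter (fun v => key v == key m)

-- counts[abs(v)] = (c0, c1, c2): c0 bumped when not (v > 0), c1 when v > 0, c2 the total;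
-- the two defaultdict updates of A's loop body are the two .modify calls.
def pvCountsA (cubes : List (List Int)) : PySem.Dict Int (Int × Int × Int) :=
  cubes.foldl (fun d cube =>
    cube.foldl (fun d v =>
      let d := d.modify |v| (0, 0, 0) (fun c =>
        if decide (v > 0) then (c.1, c.2.1 + 1, c.2.2) else (c.1 + 1, c.2.1, c.2.2));
      d.modify |v| (0, 0, 0) (fun c => (c.1, c.2.1, c.2.2 + 1))) d)
    PySem.Dict.empty

def most_binate_py (cubes : List (List Int)) : Int :=
  let counts := pvCountsA cubes
  let binate := counts.items.filter (fun p => decide (p.2.1 > 0) && decide (p.2.2.1 > 0))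
  let ties :=
    if binate.length > 0 then
      pvAllMin (pvAllMax binate (fun arg => arg.2.2.2)) (fun arg => |arg.2.2.1 - arg.2.1|)
    else
      pvAllMax counts.items (fun arg => arg.2.2.2)
  (PySem.List.min? (ties.map (fun p => p.1)) (fun x => x)).getD 0

-- ===== PORT B =====
def pvLexLt3 (a b : Int × Int × Int) : Bool :=
  decide (a.1 < b.1 ∨ (a.1 = b.1 ∧ (a.2.1 < b.2.1 ∨ (a.2.1 = b.2.1 ∧ a.2.2 < b.2.2))))

def pvLexLt2 (a b : Int × Int) : Bool :=
  decide (a.1 < b.1 ∨ (a.1 = b.1 ∧ a.2 < b.2))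

-- Python min(l, key=f) with a tuple key: first element with lexicographically minimal key
def pvArgmin3 (key : (Int × (Int × Int × Int)) → Int × Int × Int) :
    List (Int × (Int × Int × Int)) → Option (Int × (Int × Int × Int))
  | [] => none
  | x :: t => some (t.foldl (fun best e => if pvLexLt3 (key e) (key best) then e else best) x)

def pvArgmin2 (key : (Int × (Int × Int × Int)) → Int × Int) :
    List (Int × (Int × Int × Int)) → Option (Int × (Int × Int × Int))
  | [] => none
  | x :: t => some (t.foldl (fun best e => if pvLexLt2 (key e) (key best) then e else best) x)

-- counts[abs(v)] = (n, p, t) rebuilt in one dict write per literal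
def pvCountsB (cubes : List (List Int)) : PySem.Dict Int (Int × Int × Int) :=
  cubes.foldl (fun d cube =>
    cube.foldl (fun d v =>
      let c := d.getD |v| (0, 0, 0)
      d.insert |v| (if decide (v > 0) then (c.1, c.2.1 + 1, c.2.2 + 1)
                    else (c.1 + 1, c.2.1, c.2.2 + 1))) d)
    PySem.Dict.empty

def most_binate_py_alt (cubes : List (List Int)) : Int :=
  let items := (pvCountsB cubes).items
  let binate := items.filter (fun p => decide (p.2.1 > 0) && decide (p.2.2.1 > 0))
  if binate ≠ [] then
    ((pvArgmin3 (fun it => (-(it.2.2.2), |it.2.2.1 - it.2.1|, it.1)) binate).getD (0, 0, 0, 0)).1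
  else
    ((pvArgmin2 (fun it => (-(it.2.2.2), it.1)) items).getD (0, 0, 0, 0)).1

-- ===== PRECONDITION & SPEC =====
-- Pre_ excludes exactly the inputs with no literals at all (cubes empty or every cube empty):
-- there both A and B raise ValueError (min/max of an empty sequence).
def Pre_most_binate_py (cubes : List (List Int)) : Prop := cubes.flatten ≠ []
instance (cubes : List (List Int)) : Decidable (Pre_most_binate_py cubes) := by
  unfold Pre_most_binate_py; infer_instance

def pvWitness_most_binate_py : List (List Int) := [[1, -2], [-1, 2]]

def Spec_most_binate_py (cubes : List (List Int)) (out : Int) : Prop := out = most_binate_py_alt cubes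
instance (cubes : List (List Int)) (out : Int) : Decidable (Spec_most_binate_py cubes out) := by
  unfold Spec_most_binate_py; infer_instance

-- ===== CLAIM (what is proved, stated in full; the proofs are below) =====
def Claim_equal_most_binate_py : Prop := ∀ (cubes : List (List Int)), Dom_most_binate_py cubes → Pre_most_binate_py cubes → Spec_most_binate_py cubes (most_binate_py cubes)

-- ===== LEMMAS AND PROOFS =====

-- the two counting loops build the same dict
theorem pv_dict_insert_insert (d : PySem.Dict Int (Int × Int × Int)) (k : Int)
    (x y : Int × Int × Int) : (d.insert k x).insert k y = d.insert k y := by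
  apply PySem.Dict.ext
  rw [PySem.Dict.items_insert, PySem.Dict.items_insert, PySem.Dict.items_insert]
  by_cases h : d.contains k = true
  · simp only [h, if_pos, PySem.Dict.contains_insert_self, List.map_map]
    apply List.map_congr_left
    intro p _
    by_cases hp : p.1 = k <;> simp [hp]
  · have h2 : (d.insert k x).contains k = true := PySem.Dict.contains_insert_self d k x
    simp only [h, if_neg, h2, if_pos, Bool.false_eq_true, not_false_iff, List.map_append]
    have hmem : ∀ p ∈ d.items, (p.1 == k) = false := by
      intro p hp
      by_contra hc
      have : p.1 = k := by
        have := eq_true_of_ne_false hc; exact beq_iff_eq.mp this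
      apply h
      rw [PySem.Dict.contains_iff_mem_keys]
      rw [← this]
      exact List.mem_map_of_mem hp
    rw [List.map_congr_left (g := id) (by intro p hp; simp [hmem p hp]), List.map_id]
    simp

theorem pv_step_eq (d : PySem.Dict Int (Int × Int × Int)) (v : Int) :
    ((d.modify |v| (0, 0, 0) (fun c =>
        if decide (v > 0) then (c.1, c.2.1 + 1, c.2.2) else (c.1 + 1, c.2.1, c.2.2))).modify
      |v| (0, 0, 0) (fun c => (c.1, c.2.1, c.2.2 + 1)))
    = d.insert |v| (let c := d.getD |v| (0, 0, 0);
        if decide (v > 0) then (c.1, c.2.1 + 1, c.2.2 + 1) else (c.1 + 1, c.2.1, c.2.2 + 1)) := by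
  simp only [PySem.Dict.modify]
  rw [pv_dict_insert_insert, PySem.Dict.getD_insert_self]
  by_cases h : decide (v > 0) = true <;> simp [h]

theorem pv_counts_eq (cubes : List (List Int)) : pvCountsA cubes = pvCountsB cubes := by
  unfold pvCountsA pvCountsB
  have h : (fun (d : PySem.Dict Int (Int × Int × Int)) (v : Int) =>
        let d := d.modify |v| (0, 0, 0) (fun c =>
          if decide (v > 0) then (c.1, c.2.1 + 1, c.2.2) else (c.1 + 1, c.2.1, c.2.2));
        d.modify |v| (0, 0, 0) (fun c => (c.1, c.2.1, c.2.2 + 1)))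
      = (fun (d : PySem.Dict Int (Int × Int × Int)) (v : Int) =>
        let c := d.getD |v| (0, 0, 0)
        d.insert |v| (if decide (v > 0) then (c.1, c.2.1 + 1, c.2.2 + 1)
                      else (c.1 + 1, c.2.1, c.2.2 + 1))) := by
    funext d v; exact pv_step_eq d v
  rw [h]

-- B's dict is nonempty whenever some literal exists
theorem pv_items_foldl_insert_ne
    {f : PySem.Dict Int (Int × Int × Int) → Int → Int × Int × Int} (l : List Int)
    (d : PySem.Dict Int (Int × Int × Int)) (h : d.items ≠ [] ∨ l ≠ []) :
    (l.foldl (fun d v => d.insert |v| (f d v)) d).items ≠ [] := by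
  induction l generalizing d with
  | nil => simpa using h.resolve_right (by simp)
  | cons v l ih =>
    simp only [List.foldl_cons]
    apply ih
    left
    rw [PySem.Dict.items_insert]
    by_cases hc : d.contains |v| = true
    · simp only [hc, if_pos, ne_eq, List.map_eq_nil_iff]
      intro hnil
      rw [PySem.Dict.contains_iff_mem_keys] at hc
      simp [PySem.Dict.keys, hnil] at hc
    · simp [hc]

theorem pv_itemsB_ne (cubes : List (List Int)) (h : cubes.flatten ≠ []) :
    (pvCountsB cubes).items ≠ [] := by
  unfold pvCountsB
  rw [← List.foldl_flatten]
  exact pv_items_foldl_insert_ne cubes.flatten PySem.Dict.empty (Or.inr h)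

-- order facts about the boolean lexicographic comparisons
theorem pv_lex3_irrefl (a : Int × Int × Int) : pvLexLt3 a a = false := by
  obtain ⟨a1, a2, a3⟩ := a; simp [pvLexLt3]

theorem pv_lex3_asym (a b : Int × Int × Int) (h : pvLexLt3 a b = true) :
    pvLexLt3 b a = false := by
  obtain ⟨a1, a2, a3⟩ := a; obtain ⟨b1, b2, b3⟩ := b
  simp only [pvLexLt3, decide_eq_true_eq] at h
  simp only [pvLexLt3, decide_eq_false_iff_not]
  omega

theorem pv_lex3_trans (a b c : Int × Int × Int) (h1 : pvLexLt3 a b = false)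
    (h2 : pvLexLt3 b c = false) : pvLexLt3 a c = false := by
  obtain ⟨a1, a2, a3⟩ := a; obtain ⟨b1, b2, b3⟩ := b; obtain ⟨c1, c2, c3⟩ := c
  simp only [pvLexLt3, decide_eq_false_iff_not] at h1 h2 ⊢
  omega

theorem pv_lex2_irrefl (a : Int × Int) : pvLexLt2 a a = false := by
  obtain ⟨a1, a2⟩ := a; simp [pvLexLt2]

theorem pv_lex2_asym (a b : Int × Int) (h : pvLexLt2 a b = true) : pvLexLt2 b a = false := by
  obtain ⟨a1, a2⟩ := a; obtain ⟨b1, b2⟩ := b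
  simp only [pvLexLt2, decide_eq_true_eq] at h
  simp only [pvLexLt2, decide_eq_false_iff_not]
  omega

theorem pv_lex2_trans (a b c : Int × Int) (h1 : pvLexLt2 a b = false)
    (h2 : pvLexLt2 b c = false) : pvLexLt2 a c = false := by
  obtain ⟨a1, a2⟩ := a; obtain ⟨b1, b2⟩ := b; obtain ⟨c1, c2⟩ := c
  simp only [pvLexLt2, decide_eq_false_iff_not] at h1 h2 ⊢
  omega

-- the first-minimum fold: membership and lower-bound invariant
theorem pv_argmin3_fold (key : (Int × (Int × Int × Int)) → Int × Int × Int)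
    (t : List (Int × (Int × Int × Int))) (x : Int × (Int × Int × Int)) :
    (t.foldl (fun best e => if pvLexLt3 (key e) (key best) then e else best) x) ∈ x :: t ∧
    ∀ e ∈ x :: t,
      pvLexLt3 (key e)
        (key (t.foldl (fun best e => if pvLexLt3 (key e) (key best) then e else best) x)) = false := by
  induction t generalizing x with
  | nil =>
    refine ⟨by simp, ?_⟩
    intro e he
    simp only [List.mem_singleton] at he
    subst he
    exact pv_lex3_irrefl _
  | cons y t ih =>
    simp only [List.foldl_cons]
    cases hc : pvLexLt3 (key y) (key x) with
    | true =>
      simp only [if_pos]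
      obtain ⟨hmem, hle⟩ := ih y
      refine ⟨List.mem_cons_of_mem _ hmem, ?_⟩
      intro e he
      rcases List.mem_cons.mp he with h | h
      · rw [h]
        exact pv_lex3_trans _ _ _ (pv_lex3_asym _ _ hc) (hle y (by simp))
      · exact hle e h
    | false =>
      simp only [Bool.false_eq_true, if_neg, not_false_iff]
      obtain ⟨hmem, hle⟩ := ih x
      refine ⟨?_, ?_⟩
      · rcases List.mem_cons.mp hmem with h | h
        · simp [h]
        · exact List.mem_cons_of_mem _ (List.mem_cons_of_mem _ h)
      · intro e he
        rcases List.mem_cons.mp he with h | h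
        · rw [h]; exact hle x (by simp)
        · rcases List.mem_cons.mp h with h' | h'
          · rw [h']
            exact pv_lex3_trans _ _ _ hc (hle x (by simp))
          · exact hle e (List.mem_cons_of_mem _ h')

theorem pv_argmin2_fold (key : (Int × (Int × Int × Int)) → Int × Int)
    (t : List (Int × (Int × Int × Int))) (x : Int × (Int × Int × Int)) :
    (t.foldl (fun best e => if pvLexLt2 (key e) (key best) then e else best) x) ∈ x :: t ∧
    ∀ e ∈ x :: t,
      pvLexLt2 (key e)
        (key (t.foldl (fun best e => if pvLexLt2 (key e) (key best) then e else best) x)) = false := by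
  induction t generalizing x with
  | nil =>
    refine ⟨by simp, ?_⟩
    intro e he
    simp only [List.mem_singleton] at he
    subst he
    exact pv_lex2_irrefl _
  | cons y t ih =>
    simp only [List.foldl_cons]
    cases hc : pvLexLt2 (key y) (key x) with
    | true =>
      simp only [if_pos]
      obtain ⟨hmem, hle⟩ := ih y
      refine ⟨List.mem_cons_of_mem _ hmem, ?_⟩
      intro e he
      rcases List.mem_cons.mp he with h | h
      · rw [h]
        exact pv_lex2_trans _ _ _ (pv_lex2_asym _ _ hc) (hle y (by simp))
      · exact hle e h
    | false =>
      simp only [Bool.false_eq_true, if_neg, not_false_iff]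
      obtain ⟨hmem, hle⟩ := ih x
      refine ⟨?_, ?_⟩
      · rcases List.mem_cons.mp hmem with h | h
        · simp [h]
        · exact List.mem_cons_of_mem _ (List.mem_cons_of_mem _ h)
      · intro e he
        rcases List.mem_cons.mp he with h | h
        · rw [h]; exact hle x (by simp)
        · rcases List.mem_cons.mp h with h' | h'
          · rw [h']
            exact pv_lex2_trans _ _ _ hc (hle x (by simp))
          · exact hle e (List.mem_cons_of_mem _ h')

-- the binate branch: A's max-total / min-|diff| / min-index cascade = B's lexicographic scan
theorem pv_branch3 (l : List (Int × (Int × Int × Int))) (hl : l ≠ []) :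
    (PySem.List.min?
        ((pvAllMin (pvAllMax l (fun arg => arg.2.2.2)) (fun arg => |arg.2.2.1 - arg.2.1|)).map
          (fun p => p.1)) (fun x => x)).getD 0
    = ((pvArgmin3 (fun it => (-(it.2.2.2), |it.2.2.1 - it.2.1|, it.1)) l).getD (0, 0, 0, 0)).1 := by
  obtain ⟨x, t, rfl⟩ : ∃ x t, l = x :: t := by
    cases l with
    | nil => exact absurd rfl hl
    | cons x t => exact ⟨x, t, rfl⟩
  obtain ⟨hbmem, hble⟩ :=
    pv_argmin3_fold (fun it => (-(it.2.2.2), |it.2.2.1 - it.2.1|, it.1)) t x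
  set key : (Int × (Int × Int × Int)) → Int × Int × Int :=
    fun it => (-(it.2.2.2), |it.2.2.1 - it.2.1|, it.1) with hkey
  set b := t.foldl (fun best e => if pvLexLt3 (key e) (key best) then e else best) x with hbdef
  have hrhs : ((pvArgmin3 key (x :: t)).getD (0, 0, 0, 0)).1 = b.1 := by
    simp only [pvArgmin3, Option.getD_some, ← hbdef]
  rw [hrhs]
  -- the max?-of-totals step
  obtain ⟨m2, hm2⟩ : ∃ m2, PySem.List.max? (x :: t) (fun arg => arg.2.2.2) = some m2 := by
    cases h : PySem.List.max? (x :: t) (fun arg => arg.2.2.2) with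
    | none => exact absurd ((PySem.List.max?_eq_none_iff _ _).mp h) (by simp)
    | some m => exact ⟨m, rfl⟩
  unfold pvAllMax
  rw [hm2]
  have hm2mem := PySem.List.max?_mem hm2
  have hTb : m2.2.2.2 = b.2.2.2 := by
    have h1 : b.2.2.2 ≤ m2.2.2.2 := PySem.List.max?_isMax hm2 b hbmem
    have h2 := hble m2 hm2mem
    simp only [pvLexLt3, decide_eq_false_iff_not] at h2
    omega
  have hbS1 : b ∈ (x :: t).filter (fun v => v.2.2.2 == m2.2.2.2) :=
    List.mem_filter.mpr ⟨hbmem, by simp [hTb.symm]⟩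
  -- the min?-of-|diff| step
  obtain ⟨m3, hm3⟩ : ∃ m3, PySem.List.min?
      ((x :: t).filter (fun v => v.2.2.2 == m2.2.2.2)) (fun arg => |arg.2.2.1 - arg.2.1|)
      = some m3 := by
    cases h : PySem.List.min?
        ((x :: t).filter (fun v => v.2.2.2 == m2.2.2.2)) (fun arg => |arg.2.2.1 - arg.2.1|) with
    | none =>
      rw [PySem.List.min?_eq_none_iff] at h
      exact absurd (h ▸ hbS1) (List.not_mem_nil)
    | some m => exact ⟨m, rfl⟩
  unfold pvAllMin
  rw [hm3]
  have hm3S1 := PySem.List.min?_mem hm3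
  have hm3l : m3 ∈ x :: t := List.mem_of_mem_filter hm3S1
  have hm3T : m3.2.2.2 = m2.2.2.2 := by
    have := List.of_mem_filter hm3S1
    simpa using this
  have hDb : |m3.2.2.1 - m3.2.1| = |b.2.2.1 - b.2.1| := by
    have h1 : |m3.2.2.1 - m3.2.1| ≤ |b.2.2.1 - b.2.1| := PySem.List.min?_isMin hm3 b hbS1
    have h2 := hble m3 hm3l
    simp only [pvLexLt3, decide_eq_false_iff_not] at h2
    generalize hd1 : |m3.2.2.1 - m3.2.1| = d1 at *
    generalize hd2 : |b.2.2.1 - b.2.1| = d2 at *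
    omega
  have hbS2 : b ∈ ((x :: t).filter (fun v => v.2.2.2 == m2.2.2.2)).filter
      (fun v => |v.2.2.1 - v.2.1| == |m3.2.2.1 - m3.2.1|) :=
    List.mem_filter.mpr ⟨hbS1, by simp [hDb]⟩
  -- the final min of the first components
  set S2 := ((x :: t).filter (fun v => v.2.2.2 == m2.2.2.2)).filter
      (fun v => |v.2.2.1 - v.2.1| == |m3.2.2.1 - m3.2.1|) with hS2
  obtain ⟨w, hw⟩ : ∃ w, PySem.List.min? (S2.map (fun p => p.1)) (fun x => x) = some w := by
    cases h : PySem.List.min? (S2.map (fun p => p.1)) (fun x => x) with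
    | none =>
      rw [PySem.List.min?_eq_none_iff] at h
      exact absurd (h ▸ List.mem_map_of_mem hbS2 (f := fun p : Int × Int × Int × Int => p.1)) (List.not_mem_nil)
    | some w => exact ⟨w, rfl⟩
  rw [hw]
  have hwle : w ≤ b.1 :=
    PySem.List.min?_isMin hw b.1 (List.mem_map_of_mem hbS2 (f := fun p => p.1))
  obtain ⟨e, heS2, hew⟩ := List.mem_map.mp (PySem.List.min?_mem hw)
  have heS1 := List.mem_filter.mp heS2
  have heD : |e.2.2.1 - e.2.1| = |m3.2.2.1 - m3.2.1| := by
    have := heS1.2; simpa using this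
  have heT : e.2.2.2 = m2.2.2.2 := by
    have := List.of_mem_filter heS1.1; simpa using this
  have hel : e ∈ x :: t := List.mem_of_mem_filter heS1.1
  have hble_e := hble e hel
  have hbe : b.1 ≤ e.1 := by
    simp only [pvLexLt3, decide_eq_false_iff_not] at hble_e
    generalize hd1 : |e.2.2.1 - e.2.1| = d1 at *
    generalize hd2 : |b.2.2.1 - b.2.1| = d2 at *
    generalize hd3 : |m3.2.2.1 - m3.2.1| = d3 at *
    omega
  simp only [Option.getD_some]
  omega

theorem pv_branch2 (l : List (Int × (Int × Int × Int))) (hl : l ≠ []) :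
    (PySem.List.min? ((pvAllMax l (fun arg => arg.2.2.2)).map (fun p => p.1)) (fun x => x)).getD 0
    = ((pvArgmin2 (fun it => (-(it.2.2.2), it.1)) l).getD (0, 0, 0, 0)).1 := by
  obtain ⟨x, t, rfl⟩ : ∃ x t, l = x :: t := by
    cases l with
    | nil => exact absurd rfl hl
    | cons x t => exact ⟨x, t, rfl⟩
  obtain ⟨hbmem, hble⟩ := pv_argmin2_fold (fun it => (-(it.2.2.2), it.1)) t x
  set key : (Int × (Int × Int × Int)) → Int × Int := fun it => (-(it.2.2.2), it.1) with hkey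
  set b := t.foldl (fun best e => if pvLexLt2 (key e) (key best) then e else best) x with hbdef
  have hrhs : ((pvArgmin2 key (x :: t)).getD (0, 0, 0, 0)).1 = b.1 := by
    simp only [pvArgmin2, Option.getD_some, ← hbdef]
  rw [hrhs]
  obtain ⟨m2, hm2⟩ : ∃ m2, PySem.List.max? (x :: t) (fun arg => arg.2.2.2) = some m2 := by
    cases h : PySem.List.max? (x :: t) (fun arg => arg.2.2.2) with
    | none => exact absurd ((PySem.List.max?_eq_none_iff _ _).mp h) (by simp)
    | some m => exact ⟨m, rfl⟩
  unfold pvAllMax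
  rw [hm2]
  have hm2mem := PySem.List.max?_mem hm2
  have hTb : m2.2.2.2 = b.2.2.2 := by
    have h1 : b.2.2.2 ≤ m2.2.2.2 := PySem.List.max?_isMax hm2 b hbmem
    have h2 := hble m2 hm2mem
    simp only [pvLexLt2, decide_eq_false_iff_not] at h2
    omega
  have hbS1 : b ∈ (x :: t).filter (fun v => v.2.2.2 == m2.2.2.2) :=
    List.mem_filter.mpr ⟨hbmem, by simp [hTb.symm]⟩
  set S1 := (x :: t).filter (fun v => v.2.2.2 == m2.2.2.2) with hS1
  obtain ⟨w, hw⟩ : ∃ w, PySem.List.min? (S1.map (fun p => p.1)) (fun x => x) = some w := by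
    cases h : PySem.List.min? (S1.map (fun p => p.1)) (fun x => x) with
    | none =>
      rw [PySem.List.min?_eq_none_iff] at h
      exact absurd (h ▸ List.mem_map_of_mem hbS1 (f := fun p : Int × Int × Int × Int => p.1)) (List.not_mem_nil)
    | some w => exact ⟨w, rfl⟩
  rw [hw]
  have hwle : w ≤ b.1 :=
    PySem.List.min?_isMin hw b.1 (List.mem_map_of_mem hbS1 (f := fun p => p.1))
  obtain ⟨e, heS1, hew⟩ := List.mem_map.mp (PySem.List.min?_mem hw)
  have heT : e.2.2.2 = m2.2.2.2 := by
    have := List.of_mem_filter heS1; simpa using this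
  have hel : e ∈ x :: t := List.mem_of_mem_filter heS1
  have hble_e := hble e hel
  have hbe : b.1 ≤ e.1 := by
    simp only [pvLexLt2, decide_eq_false_iff_not] at hble_e
    omega
  simp only [Option.getD_some]
  omega

-- ===== VERDICT (by name: the statement is the Claim_ definition above) =====
theorem most_binate_py_spec : Claim_equal_most_binate_py := by
  intro cubes _ hpre
  unfold Spec_most_binate_py most_binate_py most_binate_py_alt
  rw [pv_counts_eq]
  simp only []
  set items := (pvCountsB cubes).items with hitems
  set binate := items.filter (fun p => decide (p.2.1 > 0) && decide (p.2.2.1 > 0)) with hbin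
  by_cases hb : binate = []
  · have hlen : ¬ binate.length > 0 := by simp [hb]
    simp only [hb, if_neg, ne_eq, not_true_eq_false, if_neg, not_false_iff]
    exact pv_branch2 items (pv_itemsB_ne cubes hpre)
  · have hlen : binate.length > 0 := List.length_pos_iff.mpr hb
    simp only [hb, hlen, if_pos, ne_eq, not_false_iff]
    exact pv_branch3 binate hb
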